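-- pv_equiv track=rewrite | github.com/CDMY0417/Tool_MATH | function_tools/function_total/ch41qc.py | find_decimal_representation_cycle
-- ===== SOURCE A (Python) =====
-- def find_decimal_representation_cycle(n: int) -> str:
--     from decimal import Decimal, getcontext
--     getcontext().prec = 100  # Set precision high enough to detect cycles
--     decimal_repr = str(Decimal(1) / Decimal(n))[2:]  # Remove '0.'
--     for cycle_length in range(1, len(decimal_repr)):
--         cycle = decimal_repr[:cycle_length]
--         if cycle * (len(decimal_repr) // cycle_length) + cycle[:len(decimal_repr) % cycle_length] == decimal_repr:
--             return cycle
--     return ''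
-- ===== SOURCE B (Python) =====
-- def find_decimal_representation_cycle(n: int) -> str:
--     from decimal import Decimal, getcontext
--     getcontext().prec = 100  # identical Decimal generation
--     s = str(Decimal(1) / Decimal(n))[2:]
--     if not s:
--         return ''
--     # KMP prefix function: fail[i] = longest proper border of s[:i+1]
--     fail = [0] * len(s)
--     k = 0
--     for i in range(1, len(s)):
--         while k and s[i] != s[k]:
--             k = fail[k - 1]
--         if s[i] == s[k]:
--             k += 1
--         fail[i] = k
--     p = len(s) - fail[-1]   # smallest period of s
--     return s[:p] if p < len(s) else ''
-- ===== Notes on version B (the rewrite author's own statement) =====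
-- stated objective: alternative
-- what changed: Keeps the identical Decimal(1)/Decimal(n) string generation but replaces the candidate loop that rebuilds a tiled copy of the string for every cycle length with a single KMP prefix-function pass: the smallest period is len(s) minus the last failure-array entry, and its prefix is the cycle.
-- outside the precondition, e.g. on find_decimal_representation_cycle(0): A raises DivisionByZero, B raises DivisionByZero
import Mathlib
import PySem

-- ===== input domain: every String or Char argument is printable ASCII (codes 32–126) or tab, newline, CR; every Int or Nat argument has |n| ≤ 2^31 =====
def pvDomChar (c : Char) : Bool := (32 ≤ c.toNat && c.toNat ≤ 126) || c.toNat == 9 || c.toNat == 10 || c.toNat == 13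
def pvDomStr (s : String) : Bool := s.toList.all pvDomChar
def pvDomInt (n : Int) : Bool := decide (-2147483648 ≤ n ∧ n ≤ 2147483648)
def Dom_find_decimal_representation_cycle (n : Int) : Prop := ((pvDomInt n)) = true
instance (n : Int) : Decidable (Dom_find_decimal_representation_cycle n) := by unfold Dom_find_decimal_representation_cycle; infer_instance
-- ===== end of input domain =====

-- B keeps A's Decimal-string generation line but replaces the tiled-string
-- candidate loop with a single KMP prefix-function pass over the digits
-- (objective: a genuinely different cycle-search algorithm).

-- ===== PORT A =====
-- A-side helper: str(Decimal(1) / Decimal(n))[2:] with getcontext().prec = 100,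
-- reproduced exactly (CPython _pydecimal __truediv__ + _fix + __str__) for |n| ≤ 2^31.
def pvNumDigits (m : Nat) : Nat := (PySem.Int.toChars (m : Int)).length

-- the exact-quotient trailing-zero strip of Decimal.__truediv__ (fuel = shift bounds the loop)
def pvStripZeros : Nat → Nat → Int → Nat × Int
  | 0, co, e => (co, e)
  | fuel + 1, co, e =>
      if e < 0 ∧ co % 10 == 0 then pvStripZeros fuel (co / 10) (e + 1) else (co, e)

-- Decimal._fix: round the coefficient to 100 significant digits, ROUND_HALF_EVEN
def pvRound100 (co : Nat) (e : Int) : Nat × Int :=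
  if pvNumDigits co ≤ 100 then (co, e)
  else
    let k := pvNumDigits co - 100
    let q := co / 10 ^ k
    let rem := co % 10 ^ k
    let q' := if 10 ^ k < 2 * rem then q + 1
              else if 2 * rem == 10 ^ k && q % 2 == 1 then q + 1 else q
    if q' == 10 ^ 100 then (q' / 10, e + k + 1) else (q', e + k)

-- str(Decimal(1) / Decimal(n))[2:] as a char list (Decimal.__str__ layout rules)
def pvDecStr (n : Int) : List Char :=
  let m := n.natAbs
  let shift := pvNumDigits m + 100
  let c0 := 10 ^ shift / m
  let r := 10 ^ shift % m
  let ce1 : Nat × Int :=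
    if r ≠ 0 then ((if c0 % 5 == 0 then c0 + 1 else c0), -(shift : Int))
    else pvStripZeros shift c0 (-(shift : Int))
  let ce := pvRound100 ce1.1 ce1.2
  let ds := PySem.Int.toChars (ce.1 : Int)
  let len : Int := ds.length
  let leftdigits : Int := ce.2 + len
  let dotplace : Int := if ce.2 ≤ 0 ∧ -6 < leftdigits then leftdigits else 1
  let body :=
    if dotplace ≤ 0 then '0' :: '.' :: (List.replicate (-dotplace).toNat '0' ++ ds)
    else if len ≤ dotplace then ds ++ List.replicate (dotplace - len).toNat '0'
    else ds.take dotplace.toNat ++ '.' :: ds.drop dotplace.toNat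
  let expp :=
    if leftdigits == dotplace then ([] : List Char)
    else 'E' :: (if 0 ≤ leftdigits - dotplace
                 then '+' :: PySem.Int.toChars (leftdigits - dotplace)
                 else '-' :: PySem.Int.toChars (((leftdigits - dotplace).natAbs : Nat) : Int))
  ((if n < 0 then ['-'] else []) ++ body ++ expp).drop 2

-- A's loop: for cycle_length in range(1, len): build the tiled string and compare
def find_decimal_representation_cycle (n : Int) : String :=
  let ds := pvDecStr n
  let L := ds.length
  match (List.range' 1 (L - 1)).find? (fun cl =>
      ((List.replicate (L / cl) (ds.take cl)).flatten ++ (ds.take cl).take (L % cl)) == ds) with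
  | some cl => String.ofList (ds.take cl)
  | none => ""

-- ===== PORT B =====
-- B-side port of the same stdlib line str(Decimal(1)/Decimal(n))[2:] (exact on Dom, |n| ≤ 2^31),
-- written independently of the A-side port: String-based digit count, a zero-counting
-- strip, and a one-increment half-even rounding step.
def pvAltDigits (m : Nat) : Nat := (PySem.Int.toStr (m : Int)).length

-- how many trailing zeros the ideal-exponent loop of Decimal.__truediv__ removes
def pvAltTZ : Nat → Int → Nat → Nat
  | 0, _, _ => 0
  | f + 1, e, v => if e < 0 ∧ v % 10 == 0 then pvAltTZ f (e + 1) (v / 10) + 1 else 0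

-- Decimal._fix at prec 100, ROUND_HALF_EVEN, as a single conditional increment
def pvAltFix (co : Nat) (e : Int) : Nat × Int :=
  let nd := pvAltDigits co
  if nd ≤ 100 then (co, e)
  else
    let k := nd - 100
    let p := 10 ^ k
    let q := co / p
    let r2 := 2 * (co % p)
    let q' := q + (if decide (p < r2) || (r2 == p && q % 2 == 1) then 1 else 0)
    if q' == 10 ^ 100 then (q' / 10, e + (k + 1)) else (q', e + k)

def pvAltDec (n : Int) : List Char :=
  let m := n.natAbs
  let sh := pvAltDigits m + 100
  let q0 := 10 ^ sh / m
  let ce :=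
    if 10 ^ sh % m == 0 then
      let t := pvAltTZ sh (-(sh : Int)) q0
      pvAltFix (q0 / 10 ^ t) ((t : Int) - (sh : Int))
    else
      pvAltFix (if q0 % 5 == 0 then q0 + 1 else q0) (-(sh : Int))
  let cs := PySem.Int.toChars (ce.1 : Int)
  let ld : Int := ce.2 + cs.length
  let dp : Int := if ce.2 ≤ 0 ∧ -6 < ld then ld else 1
  let ex : List Char :=
    if ld == dp then []
    else 'E' :: (if ld < dp then '-' :: PySem.Int.toChars (dp - ld)
                 else '+' :: PySem.Int.toChars (ld - dp))
  let bd : List Char :=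
    if dp ≤ 0 then '0' :: '.' :: (List.replicate (-dp).toNat '0' ++ cs)
    else if (cs.length : Int) ≤ dp then cs ++ List.replicate (dp - cs.length).toNat '0'
    else cs.take dp.toNat ++ '.' :: cs.drop dp.toNat
  ((if n < 0 then ['-'] else []) ++ bd ++ ex).drop 2

-- the KMP inner while loop (fuel = current k: k strictly decreases each pass)
def pvKmpWhile : Nat → List Char → Nat → List Nat → Nat → Nat
  | 0, _, _, _, k => k
  | f + 1, s, i, fail, k =>
      if k ≠ 0 ∧ s[i]? ≠ s[k]? then pvKmpWhile f s i fail (fail.getD (k - 1) 0) else k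

-- Source B: empty guard, failure array in one pass, smallest period L - fail[-1]
def find_decimal_representation_cycle_alt (n : Int) : String :=
  let s := pvAltDec n
  if s.isEmpty then "" else
  let L := s.length
  let fin := (List.range' 1 (L - 1)).foldl (fun (st : List Nat × Nat) i =>
      let k0 := pvKmpWhile st.2 s i st.1 st.2
      let k1 := if s[i]? == s[k0]? then k0 + 1 else k0
      (st.1.set i k1, k1)) (List.replicate L 0, 0)
  let p := L - fin.1.getD (L - 1) 0
  if p < L then String.ofList (s.take p) else ""

-- ===== PRECONDITION & SPEC =====
-- Pre_ excludes only n = 0, where Decimal(1)/Decimal(0) raises decimal.DivisionByZero.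
def Pre_find_decimal_representation_cycle (n : Int) : Prop := n ≠ 0
instance (n : Int) : Decidable (Pre_find_decimal_representation_cycle n) := by unfold Pre_find_decimal_representation_cycle; infer_instance
def pvWitness_find_decimal_representation_cycle : Int := (3)

def Spec_find_decimal_representation_cycle (n : Int) (out : String) : Prop := out = find_decimal_representation_cycle_alt n
instance (n : Int) (out : String) : Decidable (Spec_find_decimal_representation_cycle n out) := by unfold Spec_find_decimal_representation_cycle; infer_instance

-- ===== CLAIM (what is proved, stated in full; the proofs are below) =====
def Claim_equal_find_decimal_representation_cycle : Prop := ∀ (n : Int), Dom_find_decimal_representation_cycle n → Pre_find_decimal_representation_cycle n → Spec_find_decimal_representation_cycle n (find_decimal_representation_cycle n)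

-- ===== LEMMAS AND PROOFS =====

-- ---- the two ports of str(Decimal(1)/Decimal(n))[2:] agree ----

theorem pvAltDigits_eq (m : Nat) : pvAltDigits m = pvNumDigits m := by
  unfold pvAltDigits pvNumDigits; rw [← PySem.Int.toList_toStr]; rfl

theorem pvStrip_eq (fuel : Nat) : ∀ (co : Nat) (e : Int),
    pvStripZeros fuel co e = (co / 10 ^ pvAltTZ fuel e co, e + pvAltTZ fuel e co) := by
  induction fuel with
  | zero => intro co e; simp [pvStripZeros, pvAltTZ]
  | succ f ih =>
    intro co e
    by_cases h : e < 0 ∧ co % 10 == 0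
    · simp only [pvStripZeros, pvAltTZ, if_pos h, ih]
      refine Prod.ext ?_ ?_
      · show co / 10 / 10 ^ pvAltTZ f (e+1) (co/10) = co / 10 ^ (pvAltTZ f (e+1) (co/10) + 1)
        rw [Nat.div_div_eq_div_mul, ← pow_succ']
      · show e + 1 + (pvAltTZ f (e+1) (co/10) : Int) = e + ((pvAltTZ f (e+1) (co/10) : Nat) + 1 : Nat)
        push_cast; ring
    · simp only [pvStripZeros, pvAltTZ, if_neg h]
      simp

theorem pvFix_eq (co : Nat) (e : Int) : pvAltFix co e = pvRound100 co e := by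
  unfold pvAltFix pvRound100
  rw [pvAltDigits_eq]
  by_cases h : pvNumDigits co ≤ 100
  · simp [h]
  · simp only [if_neg h]
    have hq : (co / 10 ^ (pvNumDigits co - 100)) +
        (if decide ((10:Nat) ^ (pvNumDigits co - 100) < 2 * (co % 10 ^ (pvNumDigits co - 100))) ||
            (2 * (co % 10 ^ (pvNumDigits co - 100)) == 10 ^ (pvNumDigits co - 100) &&
             (co / 10 ^ (pvNumDigits co - 100)) % 2 == 1) then 1 else 0)
        = (if (10:Nat) ^ (pvNumDigits co - 100) < 2 * (co % 10 ^ (pvNumDigits co - 100))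
           then co / 10 ^ (pvNumDigits co - 100) + 1
           else if 2 * (co % 10 ^ (pvNumDigits co - 100)) == 10 ^ (pvNumDigits co - 100) &&
              (co / 10 ^ (pvNumDigits co - 100)) % 2 == 1
           then co / 10 ^ (pvNumDigits co - 100) + 1
           else co / 10 ^ (pvNumDigits co - 100)) := by
      split_ifs <;> simp_all
    rw [hq]
    have he : e + (((pvNumDigits co - 100 : Nat) : Int) + 1) = e + (pvNumDigits co - 100 : Nat) + 1 := by ring
    rw [he]

theorem pvDec_eq (n : Int) : pvAltDec n = pvDecStr n := by
  unfold pvAltDec pvDecStr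
  have flip : ∀ ld dp : Int,
      (if ld < dp then '-' :: PySem.Int.toChars (dp - ld) else '+' :: PySem.Int.toChars (ld - dp))
      = (if 0 ≤ ld - dp then '+' :: PySem.Int.toChars (ld - dp)
         else '-' :: PySem.Int.toChars ((((ld - dp).natAbs : Nat) : Int))) := by
    intro ld dp
    by_cases h : ld < dp
    · rw [if_pos h, if_neg (by omega)]
      congr 2
      omega
    · rw [if_neg h, if_pos (by omega)]
  simp only [pvAltDigits_eq, pvFix_eq, pvStrip_eq, flip]
  by_cases hr : 10 ^ (pvNumDigits n.natAbs + 100) % n.natAbs = 0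
  · simp [hr, sub_eq_neg_add]
  · simp [hr]

-- ---- A's tiling test characterised as the period property ----

-- p is a period of ds, phrased as A's tiling sees it (every position repeats position i % p)
def pvPerA (ds : List Char) (p : Nat) : Prop := ∀ i, i < ds.length → ds[i]? = ds[i % p]?
-- p is a period of ds, phrased position-to-position
def pvPerB (ds : List Char) (p : Nat) : Prop := ∀ i, i < ds.length → p ≤ i → ds[i]? = ds[i - p]?

theorem pvFlatRepGet (cyc : List Char) (k i : Nat) (_hpos : 0 < cyc.length)
    (h : i < k * cyc.length) :
    (List.replicate k cyc).flatten[i]? = cyc[i % cyc.length]? := by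
  induction k generalizing i with
  | zero => omega
  | succ k ih =>
    rw [List.replicate_succ, List.flatten_cons]
    by_cases hi : i < cyc.length
    · rw [List.getElem?_append_left hi, Nat.mod_eq_of_lt hi]
    · have hi' : cyc.length ≤ i := Nat.le_of_not_lt hi
      have hx : (k + 1) * cyc.length = k * cyc.length + cyc.length := by ring
      rw [List.getElem?_append_right hi', ih _ (by omega), Nat.mod_eq_sub_mod hi']

theorem pvTileGet (ds : List Char) (p i : Nat) (hp : 0 < p) (hpL : p ≤ ds.length)
    (hi : i < ds.length) :
    ((List.replicate (ds.length / p) (ds.take p)).flatten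
        ++ (ds.take p).take (ds.length % p))[i]? = ds[i % p]? := by
  have hlen : (ds.take p).length = p := by simp [List.length_take, Nat.min_eq_left hpL]
  have hflat : (List.replicate (ds.length / p) (ds.take p)).flatten.length
      = ds.length / p * p := by
    simp [List.length_flatten, List.map_replicate, hlen, List.sum_replicate, smul_eq_mul,
          Nat.mul_comm]
  have hmod : ds.length % p < p := Nat.mod_lt _ hp
  have hdm := Nat.div_add_mod ds.length p
  have hc : ds.length / p * p = p * (ds.length / p) := Nat.mul_comm _ _
  by_cases hcase : i < ds.length / p * p
  · rw [List.getElem?_append_left (by rw [hflat]; exact hcase)]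
    rw [pvFlatRepGet (ds.take p) _ i (by omega) (by rw [hlen]; exact hcase)]
    rw [hlen, List.getElem?_take_of_lt (Nat.mod_lt _ hp)]
  · have hge : ds.length / p * p ≤ i := Nat.le_of_not_lt hcase
    rw [List.getElem?_append_right (by rw [hflat]; exact hge)]
    rw [hflat]
    have hdiv : i / p = ds.length / p := Nat.div_eq_of_lt_le (by omega) (by
      have : (ds.length / p + 1) * p = ds.length / p * p + p := by ring
      omega)
    have him := Nat.div_add_mod i p
    have hcm : i / p * p = p * (i / p) := Nat.mul_comm _ _
    have hj : i - ds.length / p * p = i % p := by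
      rw [← hdiv]; omega
    rw [hj, List.getElem?_take_of_lt (by omega), List.getElem?_take_of_lt (Nat.mod_lt _ hp)]

theorem pvTileLen (ds : List Char) (p : Nat) (hp : 0 < p) (hpL : p ≤ ds.length) :
    ((List.replicate (ds.length / p) (ds.take p)).flatten
        ++ (ds.take p).take (ds.length % p)).length = ds.length := by
  have hmod : ds.length % p < p := Nat.mod_lt _ hp
  have hdm := Nat.div_add_mod ds.length p
  have hc : ds.length / p * p = p * (ds.length / p) := Nat.mul_comm _ _
  simp [List.length_flatten, List.map_replicate, List.length_take,
        Nat.min_eq_left hpL, List.sum_replicate, smul_eq_mul,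
        Nat.min_eq_left (le_of_lt hmod)]
  omega

theorem pvCondA_iff (ds : List Char) (p : Nat) (hp : 0 < p) (hpL : p ≤ ds.length) :
    ((List.replicate (ds.length / p) (ds.take p)).flatten
        ++ (ds.take p).take (ds.length % p) = ds) ↔ pvPerA ds p := by
  constructor
  · intro h i hi
    conv_lhs => rw [← h]
    exact pvTileGet ds p i hp hpL hi
  · intro h
    apply List.ext_getElem?_iff.mpr
    intro i
    by_cases hi : i < ds.length
    · rw [pvTileGet ds p i hp hpL hi, h i hi]
    · have hge : ds.length ≤ i := Nat.le_of_not_lt hi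
      rw [List.getElem?_eq_none (by rw [pvTileLen ds p hp hpL]; exact hge),
          List.getElem?_eq_none hge]

theorem pvPerA_iff_perB (ds : List Char) (p : Nat) (hp : 0 < p) :
    pvPerA ds p ↔ pvPerB ds p := by
  constructor
  · intro h i hi hpi
    rw [h i hi, h (i - p) (by omega), Nat.mod_eq_sub_mod hpi]
  · intro h i
    induction i using Nat.strong_induction_on with
    | _ i ih =>
      intro hi
      by_cases hip : i < p
      · rw [Nat.mod_eq_of_lt hip]
      · have hpi : p ≤ i := Nat.le_of_not_lt hip
        rw [h i hi hpi, ih (i - p) (by omega) (by omega), Nat.mod_eq_sub_mod hpi]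

-- ---- borders and the prefix function ----

-- b is a border of the length-t prefix of ds (pure index statement)
def pvIsB (ds : List Char) (t b : Nat) : Prop := ∀ j, j < b → ds[j]? = ds[t - b + j]?

-- longest proper border of the length-t prefix
def pvBord (ds : List Char) (t : Nat) : Nat :=
  Nat.findGreatest (fun b => ∀ j, j < b → ds[j]? = ds[t - b + j]?) (t - 1)

theorem pvBord_le (ds : List Char) (t : Nat) : pvBord ds t ≤ t - 1 :=
  Nat.findGreatest_le _

theorem pvBord_isB (ds : List Char) (t : Nat) : pvIsB ds t (pvBord ds t) := by
  unfold pvIsB pvBord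
  exact Nat.findGreatest_spec (P := fun b => ∀ j, j < b → ds[j]? = ds[t - b + j]?)
    (Nat.zero_le _) (fun j hj => absurd hj (by omega))

theorem pvBord_max (ds : List Char) (t b : Nat) (hb : b ≤ t - 1) (h : pvIsB ds t b) :
    b ≤ pvBord ds t := Nat.le_findGreatest hb h

-- extending a border by one matching character
theorem pvIsB_succ (ds : List Char) (t b : Nat) (hb : b ≤ t) :
    pvIsB ds (t + 1) (b + 1) ↔ pvIsB ds t b ∧ ds[b]? = ds[t]? := by
  unfold pvIsB
  constructor
  · intro h
    refine ⟨fun j hj => ?_, ?_⟩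
    · have := h j (by omega)
      rwa [show t + 1 - (b + 1) + j = t - b + j by omega] at this
    · have := h b (by omega)
      rwa [show t + 1 - (b + 1) + b = t by omega] at this
  · rintro ⟨h1, h2⟩ j hj
    rcases Nat.lt_or_ge j b with hjb | hjb
    · rw [show t + 1 - (b + 1) + j = t - b + j by omega]
      exact h1 j hjb
    · have hjb' : j = b := by omega
      subst hjb'
      rwa [show t + 1 - (j + 1) + j = t by omega]

-- a shorter border of the same prefix is a border of the longer border
theorem pvIsB_nest (ds : List Char) (t b1 b2 : Nat) (h1 : pvIsB ds t b1) (h2 : pvIsB ds t b2)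
    (h12 : b1 ≤ b2) (h2t : b2 ≤ t) : pvIsB ds b2 b1 := by
  intro j hj
  have e2 := h2 (b2 - b1 + j) (by omega)
  rw [show t - b2 + (b2 - b1 + j) = t - b1 + j by omega] at e2
  rw [e2]
  exact h1 j (by omega)

-- a border of a border is a border
theorem pvIsB_trans (ds : List Char) (t b c : Nat) (h1 : pvIsB ds t b) (h2 : pvIsB ds b c)
    (hbt : b ≤ t) (hcb : c ≤ b) : pvIsB ds t c := by
  intro j hj
  rw [h2 j hj]
  have := h1 (b - c + j) (by omega)
  rwa [show t - b + (b - c + j) = t - c + j by omega] at this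

-- the while loop descends the border chain to the longest matching border
theorem pvKmpWhile_spec (ds : List Char) (fail : List Nat) (i : Nat) (_hi : 1 ≤ i)
    (hfail : ∀ j, j < i → fail.getD j 0 = pvBord ds (j + 1)) :
    ∀ fuel k, k ≤ fuel → k < i → pvIsB ds i k →
      (∀ b, b < i → pvIsB ds i b → ds[b]? = ds[i]? → b ≤ k) →
      (pvKmpWhile fuel ds i fail k < i ∧
       pvIsB ds i (pvKmpWhile fuel ds i fail k) ∧
       (pvKmpWhile fuel ds i fail k = 0 ∨ ds[pvKmpWhile fuel ds i fail k]? = ds[i]?) ∧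
       (∀ b, b < i → pvIsB ds i b → ds[b]? = ds[i]? → b ≤ pvKmpWhile fuel ds i fail k)) := by
  intro fuel
  induction fuel with
  | zero =>
    intro k hk hki hborder hmax
    have : k = 0 := by omega
    subst this
    have e : pvKmpWhile 0 ds i fail 0 = 0 := rfl
    rw [e]
    exact ⟨by omega, hborder, Or.inl rfl, hmax⟩
  | succ f ih =>
    intro k hk hki hborder hmax
    by_cases hc : k ≠ 0 ∧ ds[i]? ≠ ds[k]?
    · rw [pvKmpWhile, if_pos hc]
      have hk0 : k ≠ 0 := hc.1
      have hne : ds[i]? ≠ ds[k]? := hc.2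
      have hfk : fail.getD (k - 1) 0 = pvBord ds k := by
        have := hfail (k - 1) (by omega)
        rwa [show k - 1 + 1 = k by omega] at this
      rw [hfk]
      have hble : pvBord ds k ≤ k - 1 := pvBord_le ds k
      have hbk : pvIsB ds k (pvBord ds k) := pvBord_isB ds k
      have hbi : pvIsB ds i (pvBord ds k) :=
        pvIsB_trans ds i k (pvBord ds k) hborder hbk (by omega) (by omega)
      refine ih (pvBord ds k) (by omega) (by omega) hbi ?_
      intro b hbi' hB hmatch
      have hbk' : b ≤ k := hmax b hbi' hB hmatch
      have hbne : b ≠ k := by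
        intro h; subst h; exact hne hmatch.symm
      have hnest : pvIsB ds k b :=
        pvIsB_nest ds i b k hB hborder (by omega) (by omega)
      exact pvBord_max ds k b (by omega) hnest
    · rw [pvKmpWhile, if_neg hc]
      push Not at hc
      refine ⟨hki, hborder, ?_, hmax⟩
      by_cases h0 : k = 0
      · exact Or.inl h0
      · exact Or.inr (hc h0).symm

-- one body of the failure-array loop computes the next prefix-function value
theorem pvKmpStep (ds : List Char) (fail : List Nat) (i : Nat) (hi : 1 ≤ i)
    (hfail : ∀ j, j < i → fail.getD j 0 = pvBord ds (j + 1)) :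
    (if ds[i]? == ds[pvKmpWhile (pvBord ds i) ds i fail (pvBord ds i)]?
     then pvKmpWhile (pvBord ds i) ds i fail (pvBord ds i) + 1
     else pvKmpWhile (pvBord ds i) ds i fail (pvBord ds i)) = pvBord ds (i + 1) := by
  obtain ⟨hlt, hB, hexit, hmaxs⟩ :=
    pvKmpWhile_spec ds fail i hi hfail (pvBord ds i) (pvBord ds i) le_rfl
      (by have := pvBord_le ds i; omega) (pvBord_isB ds i)
      (fun b hb hisb hm => pvBord_max ds i b (by omega) hisb)
  set K := pvKmpWhile (pvBord ds i) ds i fail (pvBord ds i) with hK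
  by_cases hm : ds[i]? = ds[K]?
  · rw [if_pos (beq_iff_eq.mpr hm)]
    apply le_antisymm
    · exact pvBord_max ds (i + 1) (K + 1) (by omega)
        ((pvIsB_succ ds i K (by omega)).mpr ⟨hB, hm.symm⟩)
    · rcases Nat.eq_zero_or_pos (pvBord ds (i + 1)) with h0 | h0
      · omega
      · have hB' : pvIsB ds (i + 1) (pvBord ds (i + 1)) := pvBord_isB ds (i + 1)
        have hle : pvBord ds (i + 1) ≤ i := by have := pvBord_le ds (i + 1); omega
        have := (pvIsB_succ ds i (pvBord ds (i + 1) - 1) (by omega)).mp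
          (by rwa [show pvBord ds (i + 1) - 1 + 1 = pvBord ds (i + 1) by omega])
        have hle2 := hmaxs (pvBord ds (i + 1) - 1) (by omega) this.1 this.2
        omega
  · rw [if_neg (by simpa using hm)]
    have hK0 : K = 0 := by
      rcases hexit with h | h
      · exact h
      · exact absurd h.symm hm
    rcases Nat.eq_zero_or_pos (pvBord ds (i + 1)) with h0 | h0
    · omega
    · have hB' : pvIsB ds (i + 1) (pvBord ds (i + 1)) := pvBord_isB ds (i + 1)
      have hle : pvBord ds (i + 1) ≤ i := by have := pvBord_le ds (i + 1); omega
      have hsucc := (pvIsB_succ ds i (pvBord ds (i + 1) - 1) (by omega)).mp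
        (by rwa [show pvBord ds (i + 1) - 1 + 1 = pvBord ds (i + 1) by omega])
      have hle2 := hmaxs (pvBord ds (i + 1) - 1) (by omega) hsucc.1 hsucc.2
      have hb1 : pvBord ds (i + 1) = 1 := by omega
      rw [hb1] at hsucc
      exact absurd hsucc.2 (fun h => hm (by rw [hK0]; exact h.symm))

-- the fold over all positions fills the failure array with the prefix function
theorem pvKmpFoldAux (ds : List Char) :
    ∀ cnt i fail k, 1 ≤ i → i + cnt = ds.length → fail.length = ds.length →
      (∀ j, j < i → fail.getD j 0 = pvBord ds (j + 1)) → k = pvBord ds i →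
      (((List.range' i cnt).foldl (fun (st : List Nat × Nat) i =>
          let k0 := pvKmpWhile st.2 ds i st.1 st.2
          let k1 := if ds[i]? == ds[k0]? then k0 + 1 else k0
          (st.1.set i k1, k1)) (fail, k)).1.length = ds.length ∧
       (∀ j, j < ds.length →
        ((List.range' i cnt).foldl (fun (st : List Nat × Nat) i =>
          let k0 := pvKmpWhile st.2 ds i st.1 st.2
          let k1 := if ds[i]? == ds[k0]? then k0 + 1 else k0
          (st.1.set i k1, k1)) (fail, k)).1.getD j 0 = pvBord ds (j + 1))) := by
  intro cnt
  induction cnt with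
  | zero =>
    intro i fail k hi hiL hlen hfail hk
    simp only [List.range'_zero, List.foldl_nil]
    exact ⟨hlen, fun j hj => hfail j (by omega)⟩
  | succ c ih =>
    intro i fail k hi hiL hlen hfail hk
    rw [List.range'_succ, List.foldl_cons]
    have hstep : (if ds[i]? == ds[pvKmpWhile k ds i fail k]?
        then pvKmpWhile k ds i fail k + 1 else pvKmpWhile k ds i fail k) = pvBord ds (i + 1) := by
      rw [hk]
      exact pvKmpStep ds fail i hi hfail
    simp only
    rw [hstep]
    refine ih (i + 1) (fail.set i (pvBord ds (i + 1))) (pvBord ds (i + 1))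
      (by omega) (by omega) (by simpa using hlen) ?_ rfl
    intro j hj
    rcases Nat.lt_or_ge j i with hji | hji
    · rw [List.getD_eq_getElem?_getD, List.getElem?_set_ne (by omega),
          ← List.getD_eq_getElem?_getD]
      exact hfail j hji
    · have : j = i := by omega
      subst this
      rw [List.getD_eq_getElem?_getD, List.getElem?_set_self (by omega), Option.getD_some]

theorem pvKmpFold (ds : List Char) (hL : 1 ≤ ds.length) (fail : List Nat)
    (hlen : fail.length = ds.length) (hfail : ∀ j, j < 1 → fail.getD j 0 = pvBord ds (j + 1)) :
    (((List.range' 1 (ds.length - 1)).foldl (fun (st : List Nat × Nat) i =>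
        let k0 := pvKmpWhile st.2 ds i st.1 st.2
        let k1 := if ds[i]? == ds[k0]? then k0 + 1 else k0
        (st.1.set i k1, k1)) (fail, 0)).1.getD (ds.length - 1) 0) = pvBord ds ds.length := by
  have h0 : (0 : Nat) = pvBord ds 1 := by
    unfold pvBord
    simp
  obtain ⟨-, h⟩ := pvKmpFoldAux ds (ds.length - 1) 1 fail 0 le_rfl (by omega) hlen hfail h0
  have := h (ds.length - 1) (by omega)
  rwa [show ds.length - 1 + 1 = ds.length from by omega] at this

-- ---- both searches return the prefix of the minimal period ----

theorem pvPerB_iff_isB (ds : List Char) (p : Nat) (hp : 1 ≤ p) (hpL : p ≤ ds.length) :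
    pvPerB ds p ↔ pvIsB ds ds.length (ds.length - p) := by
  unfold pvPerB pvIsB
  constructor
  · intro h j hj
    have := h (p + j) (by omega) (by omega)
    rw [show p + j - p = j from by omega] at this
    rw [← this, show ds.length - (ds.length - p) + j = p + j from by omega]
  · intro h i hiL hpi
    have := h (i - p) (by omega)
    rw [show ds.length - (ds.length - p) + (i - p) = i from by omega] at this
    exact this.symm

theorem pvAfind (ds : List Char) :
    (List.range' 1 (ds.length - 1)).find? (fun cl =>
      ((List.replicate (ds.length / cl) (ds.take cl)).flatten
        ++ (ds.take cl).take (ds.length % cl)) == ds)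
    = (if pvBord ds ds.length = 0 then none else some (ds.length - pvBord ds ds.length)) := by
  have hpred : ∀ p, 1 ≤ p → p ≤ ds.length - 1 →
      ((((List.replicate (ds.length / p) (ds.take p)).flatten
          ++ (ds.take p).take (ds.length % p)) == ds) = true ↔ pvIsB ds ds.length (ds.length - p)) := by
    intro p h1 h2
    rw [beq_iff_eq, pvCondA_iff ds p (by omega) (by omega), pvPerA_iff_perB ds p (by omega)]
    exact pvPerB_iff_isB ds p h1 (by omega)
  by_cases h0 : pvBord ds ds.length = 0
  · rw [if_pos h0]
    refine List.find?_eq_none.mpr ?_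
    intro p hp hsat
    rw [List.mem_range'_1] at hp
    have hb := (hpred p hp.1 (by omega)).mp hsat
    have := pvBord_max ds ds.length (ds.length - p) (by omega) hb
    omega
  · rw [if_neg h0]
    have hBle := pvBord_le ds ds.length
    have hB1 : 1 ≤ pvBord ds ds.length := by omega
    have hL2 : 2 ≤ ds.length := by omega
    have hsplit : List.range' 1 (ds.length - 1)
        = List.range' 1 (ds.length - pvBord ds ds.length - 1)
          ++ List.range' (ds.length - pvBord ds ds.length) (pvBord ds ds.length) := by
      have e := List.range'_append (s := 1) (m := ds.length - pvBord ds ds.length - 1)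
        (n := pvBord ds ds.length) (step := 1)
      rw [show 1 + 1 * (ds.length - pvBord ds ds.length - 1) = ds.length - pvBord ds ds.length
            from by omega] at e
      rw [show ds.length - pvBord ds ds.length - 1 + pvBord ds ds.length = ds.length - 1
            from by omega] at e
      exact e.symm
    rw [hsplit, List.find?_append]
    have h1 : (List.range' 1 (ds.length - pvBord ds ds.length - 1)).find? (fun cl =>
        ((List.replicate (ds.length / cl) (ds.take cl)).flatten
          ++ (ds.take cl).take (ds.length % cl)) == ds) = none := by
      refine List.find?_eq_none.mpr ?_
      intro p hp hsat
      rw [List.mem_range'_1] at hp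
      have hb := (hpred p hp.1 (by omega)).mp hsat
      have := pvBord_max ds ds.length (ds.length - p) (by omega) hb
      omega
    rw [h1]
    have hcons : List.range' (ds.length - pvBord ds ds.length) (pvBord ds ds.length)
        = (ds.length - pvBord ds ds.length)
          :: List.range' (ds.length - pvBord ds ds.length + 1) (pvBord ds ds.length - 1) := by
      have e := List.range'_succ (s := ds.length - pvBord ds ds.length)
        (n := pvBord ds ds.length - 1) (step := 1)
      rw [show (pvBord ds ds.length - 1) + 1 = pvBord ds ds.length from by omega] at e
      exact e
    rw [hcons, List.find?_cons_of_pos, Option.none_or]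
    refine (hpred (ds.length - pvBord ds ds.length) (by omega) (by omega)).mpr ?_
    rw [show ds.length - (ds.length - pvBord ds ds.length) = pvBord ds ds.length from by omega]
    exact pvBord_isB ds ds.length

theorem pvBothChar (ds : List Char) :
    (match (List.range' 1 (ds.length - 1)).find? (fun cl =>
        ((List.replicate (ds.length / cl) (ds.take cl)).flatten
          ++ (ds.take cl).take (ds.length % cl)) == ds) with
      | some cl => String.ofList (ds.take cl)
      | none => "")
    = (if ds.isEmpty then "" else
       if ds.length - (((List.range' 1 (ds.length - 1)).foldl (fun (st : List Nat × Nat) i =>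
            let k0 := pvKmpWhile st.2 ds i st.1 st.2
            let k1 := if ds[i]? == ds[k0]? then k0 + 1 else k0
            (st.1.set i k1, k1)) (List.replicate ds.length 0, 0)).1.getD (ds.length - 1) 0)
          < ds.length
       then String.ofList (ds.take (ds.length -
              (((List.range' 1 (ds.length - 1)).foldl (fun (st : List Nat × Nat) i =>
                let k0 := pvKmpWhile st.2 ds i st.1 st.2
                let k1 := if ds[i]? == ds[k0]? then k0 + 1 else k0
                (st.1.set i k1, k1)) (List.replicate ds.length 0, 0)).1.getD (ds.length - 1) 0)))
       else "") := by
  by_cases hL : ds.isEmpty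
  · rw [if_pos hL]
    have h0 : ds.length = 0 := by simpa [List.isEmpty_iff_length_eq_zero] using hL
    rw [h0]
    simp
  · rw [if_neg hL]
    have hL1 : 1 ≤ ds.length := by
      rcases ds with _ | _
      · simp at hL
      · simp
    have hinit : ∀ j, j < 1 → (List.replicate ds.length 0).getD j 0 = pvBord ds (j + 1) := by
      intro j hj
      have hj0 : j = 0 := by omega
      subst hj0
      have e : pvBord ds 1 = 0 := by
        unfold pvBord
        simp
      rw [e, List.getD_eq_getElem?_getD, List.getElem?_replicate]
      rw [if_pos (by omega)]
      rfl
    rw [pvAfind ds, pvKmpFold ds hL1 (List.replicate ds.length 0) (by simp) hinit]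
    by_cases h0 : pvBord ds ds.length = 0
    · rw [if_pos h0, h0]
      rw [if_neg (by omega)]
    · rw [if_neg h0, if_pos (by have := pvBord_le ds ds.length; omega)]

theorem pvMain (n : Int) :
    find_decimal_representation_cycle n = find_decimal_representation_cycle_alt n := by
  unfold find_decimal_representation_cycle find_decimal_representation_cycle_alt
  rw [pvDec_eq]
  exact pvBothChar (pvDecStr n)

-- ===== VERDICT (by name: the statement is the Claim_ definition above) =====
theorem find_decimal_representation_cycle_spec : Claim_equal_find_decimal_representation_cycle := by
  intro n _ _
  show _ = _
  exact pvMain n
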